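-- pv_equiv track=rewrite | github.com/satishchalla67/DSA | 2.Sorting/12.FeaturedProducts.py | checkFeatured
-- ===== SOURCE A (Python) =====
-- def checkFeatured(products):
--
--     productDict = {}
--
--     for product in products:
--         productDict[product] = productDict.get(product, 0)+1
--
--     sortedProducts = sorted(productDict.items(), key= lambda x : (-x[1], x[0]))
--
--     max_sold = sortedProducts[0][1]
--     res = None
--     for product, freq in sortedProducts:
--         if freq == max_sold:
--             res = product
--     return res
-- ===== SOURCE B (Python) =====
-- def checkFeatured(products):
--     s = sorted(products)
--     res = s[0]
--     best = 0
--     cur = 0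
--     prev = None
--     for x in s:
--         if x == prev:
--             cur += 1
--         else:
--             cur = 1
--             prev = x
--         if cur >= best:
--             best = cur
--             res = x
--     return res
-- ===== Notes on version B (the rewrite author's own statement) =====
-- stated objective: alternative
-- what changed: B drops A's frequency dictionary and key-sort of (product,count) pairs entirely: it sorts the raw product list once and finds the most frequent (alphabetically largest on ties) element with a single run-length scan using a >= update.
import Mathlib
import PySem

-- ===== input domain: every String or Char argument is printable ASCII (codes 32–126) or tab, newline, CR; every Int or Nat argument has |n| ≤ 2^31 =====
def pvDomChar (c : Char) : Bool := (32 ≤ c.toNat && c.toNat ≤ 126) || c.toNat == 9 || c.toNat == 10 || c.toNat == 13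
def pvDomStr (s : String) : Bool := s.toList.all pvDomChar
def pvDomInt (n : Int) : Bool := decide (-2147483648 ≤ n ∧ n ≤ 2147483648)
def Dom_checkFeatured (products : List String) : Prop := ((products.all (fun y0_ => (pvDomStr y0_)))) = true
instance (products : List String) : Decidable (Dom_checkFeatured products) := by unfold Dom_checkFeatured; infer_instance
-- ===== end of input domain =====

-- B replaces A's frequency dictionary + key-sort of (product,count) pairs by one sort of the
-- raw list and a run-length scan (objective: alternative — one data structure fewer).

-- ===== PORT A =====
def checkFeatured (products : List String) : String :=
  let productDict := products.foldl
    (fun d product => d.insert product (d.getD product 0 + 1)) (PySem.Dict.empty)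
  let sortedProducts :=
    PySem.List.sorted2 productDict.items (fun x => -x.2) (fun x => x.1) false
  match PySem.List.pyGet? sortedProducts 0 with
  | none => ""          -- sortedProducts[0] raises IndexError (empty input): outside Pre_
  | some first =>
    let maxSold := first.2
    let res := sortedProducts.foldl
      (fun res x => if x.2 == maxSold then some x.1 else res) (none : Option String)
    res.getD ""         -- res is never none when sortedProducts is nonempty

-- ===== PORT B =====
-- B's loop body (state: res, best, cur, prev), exactly Source B's for-body
def altStep (st : String × Int × Int × Option String) (x : String) :
    String × Int × Int × Option String :=
  let cur' := if st.2.2.2 == some x then st.2.2.1 + 1 else 1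
  if st.2.1 ≤ cur' then (x, cur', cur', some x) else (st.1, st.2.1, cur', some x)

def checkFeatured_alt (products : List String) : String :=
  let s := PySem.List.sorted products (fun x => x) false
  match PySem.List.pyGet? s 0 with
  | none => ""          -- s[0] raises IndexError (empty input): outside Pre_
  | some r0 => (s.foldl altStep (r0, 0, 0, none)).1

-- ===== PRECONDITION & SPEC =====
-- Pre_ excludes only the empty list, on which A raises IndexError (sortedProducts[0]).
def Pre_checkFeatured (products : List String) : Prop := products ≠ []
instance (products : List String) : Decidable (Pre_checkFeatured products) := by
  unfold Pre_checkFeatured; infer_instance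

def pvWitness_checkFeatured : List String := ["a"]

def Spec_checkFeatured (products : List String) (out : String) : Prop :=
  out = checkFeatured_alt products
instance (products : List String) (out : String) : Decidable (Spec_checkFeatured products out) := by
  unfold Spec_checkFeatured; infer_instance

-- ===== CLAIM (what is proved, stated in full; the proofs are below) =====
def Claim_equal_checkFeatured : Prop := ∀ (products : List String),
  Dom_checkFeatured products → Pre_checkFeatured products →
    Spec_checkFeatured products (checkFeatured products)

-- ===== LEMMAS AND PROOFS =====

def GoodRes (products : List String) (r : String) : Prop :=
  r ∈ products ∧ ∀ y ∈ products,
    products.count y < products.count r ∨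
    (products.count y = products.count r ∧ y ≤ r)

theorem good_unique {products : List String} {r₁ r₂ : String}
    (h₁ : GoodRes products r₁) (h₂ : GoodRes products r₂) : r₁ = r₂ := by
  rcases h₁ with ⟨m₁, h₁⟩
  rcases h₂ with ⟨m₂, h₂⟩
  rcases h₁ r₂ m₂ with h | ⟨hc, hle⟩ <;> rcases h₂ r₁ m₁ with h' | ⟨hc', hle'⟩ <;>
    first
    | omega
    | exact absurd hle' (by omega)
    | exact absurd hle (by omega)
    | exact le_antisymm hle' hle

-- A's tuple sort key (-freq, name), as a lexicographic key

def keyA (x : String × Int) : Lex (Int × String) := toLex (-x.2, x.1)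

theorem sorted2_eq_sorted_keyA (l : List (String × Int)) :
    PySem.List.sorted2 l (fun x => -x.2) (fun x => x.1) false =
      PySem.List.sorted l keyA := by
  rw [PySem.List.sorted_eq_foldl_insertBy]
  simp only [PySem.List.sorted2]
  have h : (fun (a b : String × Int) => decide (-a.2 < -b.2) || (!decide (-b.2 < -a.2) && decide (a.1 < b.1)))
      = fun a b => decide (keyA a < keyA b) := by
    funext a b
    by_cases h1 : -a.2 < -b.2 <;> by_cases h2 : -b.2 < -a.2 <;> by_cases h3 : a.1 < b.1 <;>
      simp [keyA, Prod.Lex.lt_iff, h1, h2, h3] <;> omega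
  rw [h]
  simp

theorem foldl_lastmatch {α β : Type} (p : α → Bool) (f : α → β) :
    ∀ (l : List α) (init : Option β),
      l.foldl (fun r x => if p x then some (f x) else r) init =
        ((l.filter p).getLast?).elim init (fun x => some (f x)) := by
  intro l
  induction l with
  | nil => intro init; simp
  | cons a l ih =>
    intro init
    rw [List.foldl_cons, ih, List.filter_cons]
    by_cases hp : p a
    · cases hfl : l.filter p with
      | nil => simp [hp]
      | cons b fl =>
        simp only [hp, if_true]
        rw [List.getLast?_cons_cons]
        cases hz : (b :: fl).getLast? with
        | none => exact absurd (List.getLast?_eq_none_iff.mp hz) (by simp)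
        | some z => simp
    · simp [hp]

theorem pairwise_last {α : Type} {R : α → α → Prop} :
    ∀ {l : List α} {z : α}, l.Pairwise R → l.getLast? = some z →
      ∀ x ∈ l, R x z ∨ x = z := by
  intro l
  induction l with
  | nil => simp
  | cons a l ih =>
    intro z hpw hlast x hx
    cases l with
    | nil =>
      simp only [List.getLast?_singleton, Option.some.injEq] at hlast
      rcases List.mem_singleton.mp hx with rfl
      right; exact hlast.symm ▸ rfl
    | cons b l' =>
      rw [List.getLast?_cons_cons] at hlast
      rcases List.pairwise_cons.mp hpw with ⟨ha, hpw'⟩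
      rcases List.mem_cons.mp hx with rfl | hx2
      · left; exact ha z (List.mem_of_getLast? hlast)
      · exact ih hpw' hlast x hx2

theorem mem_items_counter {products : List String} {x : String × Int} :
    x ∈ (PySem.Dict.counter products).items ↔
      x.1 ∈ products ∧ x.2 = (products.count x.1 : Int) := by
  rw [PySem.Dict.items_counter]
  constructor
  · intro hx
    rcases List.mem_map.mp hx with ⟨k, hk, rfl⟩
    exact ⟨(PySem.Set.mem_ofList _ _).mp hk, rfl⟩
  · intro ⟨h1, h2⟩
    refine List.mem_map.mpr ⟨x.1, (PySem.Set.mem_ofList _ _).mpr h1, ?_⟩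
    rw [← h2]

theorem A_good (products : List String) (h : products ≠ []) :
    GoodRes products (checkFeatured products) := by
  simp only [checkFeatured]
  rw [PySem.Dict.foldl_insert_getD_add_one_eq_counter, sorted2_eq_sorted_keyA]
  obtain ⟨q, tq, rfl⟩ : ∃ q tq, products = q :: tq := by
    cases products with
    | nil => exact absurd rfl h
    | cons a b => exact ⟨a, b, rfl⟩
  set products := q :: tq with hprod
  have hqi : (q, (products.count q : Int)) ∈ (PySem.Dict.counter products).items :=
    mem_items_counter.mpr ⟨by simp [hprod], rfl⟩
  have hqs := (PySem.List.mem_sorted (PySem.Dict.counter products).items keyA false _).mpr hqi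
  cases hsp : PySem.List.sorted (PySem.Dict.counter products).items keyA with
  | nil => rw [hsp] at hqs; simp at hqs
  | cons m t =>
    have hget : PySem.List.pyGet? (m :: t) 0 = some m := by
      simp [PySem.List.pyGet?, PySem.List.pyIdx?]
    rw [hget]
    simp only []
    rw [foldl_lastmatch (fun x => x.2 == m.2) Prod.fst]
    have hmf : m ∈ (m :: t).filter (fun x => x.2 == m.2) :=
      List.mem_filter.mpr ⟨List.mem_cons_self .., by simp⟩
    cases hg : ((m :: t).filter (fun x => x.2 == m.2)).getLast? with
    | none => exact absurd (List.getLast?_eq_none_iff.mp hg) (List.ne_nil_of_mem hmf)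
    | some w =>
      simp only [Option.elim_some, Option.getD_some]
      -- facts about w
      have hwf := List.mem_of_getLast? hg
      obtain ⟨hwmem, hwp⟩ := List.mem_filter.mp hwf
      have hw2m : w.2 = m.2 := by simpa using hwp
      have hwit : w ∈ (PySem.Dict.counter products).items :=
        (PySem.List.mem_sorted _ keyA false _).mp (hsp ▸ hwmem)
      obtain ⟨hwprod, hwcnt⟩ := mem_items_counter.mp hwit
      have hmit : m ∈ (PySem.Dict.counter products).items :=
        (PySem.List.mem_sorted _ keyA false _).mp (hsp ▸ List.mem_cons_self ..)
      have hmax := PySem.List.key_head_sorted_le _ keyA hsp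
      have hpw : ((m :: t).filter (fun x => x.2 == m.2)).Pairwise (fun a b => keyA a ≤ keyA b) := by
        have := PySem.List.sorted_pairwise (PySem.Dict.counter products).items keyA
        rw [hsp] at this
        exact this.filter _
      have hlast := pairwise_last hpw hg
      constructor
      · exact hwprod
      · intro y hy
        have hyi : (y, (products.count y : Int)) ∈ (PySem.Dict.counter products).items :=
          mem_items_counter.mpr ⟨hy, rfl⟩
        have hymax := hmax _ hyi
        simp only [keyA, Prod.Lex.le_iff, ofLex_toLex] at hymax
        -- products.count y ≤ m.2 (as Int)
        have hcy : (products.count y : Int) ≤ m.2 := by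
          rcases hymax with h1 | ⟨h1, _⟩ <;> omega
        have hcwm : (products.count w.1 : Int) = m.2 := by rw [← hwcnt, hw2m]
        by_cases hceq : products.count y = products.count w.1
        · right
          refine ⟨hceq, ?_⟩
          have hyf : (y, (products.count y : Int)) ∈ (m :: t).filter (fun x => x.2 == m.2) := by
            refine List.mem_filter.mpr ⟨hsp ▸ (PySem.List.mem_sorted _ keyA false _).mpr hyi, ?_⟩
            simp only [beq_iff_eq]
            rw [hceq, hcwm]
          rcases hlast _ hyf with hle | heq
          · simp only [keyA, Prod.Lex.le_iff, ofLex_toLex] at hle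
            rcases hle with h1 | ⟨_, h2⟩
            · exfalso; rw [hceq, hcwm, hw2m] at h1; omega
            · exact h2
          · rw [← heq]
        · left
          omega

def BInv (t : List String) (st : String × Int × Int × Option String) : Prop :=
  st.1 ∈ t ∧ st.2.1 = (t.count st.1 : Int) ∧
  (∀ y ∈ t, (t.count y : Int) ≤ st.2.1) ∧
  (∀ y ∈ t, t.count y = t.count st.1 → y ≤ st.1) ∧
  ∃ p, st.2.2.2 = some p ∧ p ∈ t ∧ (∀ y ∈ t, y ≤ p) ∧ st.2.2.1 = (t.count p : Int)

theorem inv_step (t : List String) (x : String) (st : String × Int × Int × Option String)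
    (hub : ∀ y ∈ t, y ≤ x) (hinv : BInv t st) : BInv (t ++ [x]) (altStep st x) := by
  obtain ⟨res, best, cur, prev⟩ := st
  obtain ⟨hres, hbest, hbound, hach, p, hprev, hpmem, hpub, hcur⟩ := hinv
  simp only at hres hbest hbound hach hprev hcur
  subst hprev
  have hcnt : ∀ y : String, (t ++ [x]).count y = t.count y + if y = x then 1 else 0 := by
    intro y
    by_cases hyx : y = x
    · simp [hyx, List.count_append]
    · simp [hyx, Ne.symm hyx, List.count_append]
  by_cases hx : p = x
  · subst hx
    have hbeq : ((some p : Option String) == some p) = true := by simp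
    simp only [altStep, hbeq, if_true]
    by_cases hb : best ≤ cur + 1
    · rw [if_pos hb]
      simp only [BInv]
      refine ⟨List.mem_append_right _ (List.mem_singleton.mpr rfl), ?_, ?_, ?_, p, rfl, ?_, ?_, ?_⟩
      · rw [hcnt]; simp [hcur]
      · intro y hy
        rcases List.mem_append.mp hy with hy | hy
        · by_cases hyp : y = p
          · subst hyp; rw [hcnt]; simp; omega
          · rw [hcnt, if_neg hyp]; have := hbound y hy; omega
        · rw [List.mem_singleton.mp hy, hcnt]; simp; omega
      · intro y hy _
        rcases List.mem_append.mp hy with hy | hy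
        · exact hpub y hy
        · exact le_of_eq (List.mem_singleton.mp hy)
      · exact List.mem_append_right _ (List.mem_singleton.mpr rfl)
      · intro y hy
        rcases List.mem_append.mp hy with hy | hy
        · exact hpub y hy
        · exact le_of_eq (List.mem_singleton.mp hy)
      · rw [hcnt]; simp; omega
    · rw [if_neg hb]
      simp only [BInv]
      have hrp : res ≠ p := by
        intro hrp; subst hrp
        rw [← hbest] at hcur
        omega
      refine ⟨List.mem_append_left _ hres, ?_, ?_, ?_, p, rfl, List.mem_append_left _ hpmem, ?_, ?_⟩
      · rw [hcnt, if_neg hrp]; simpa using hbest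
      · intro y hy
        by_cases hyp : y = p
        · subst hyp; rw [hcnt]; simp; omega
        · rw [hcnt, if_neg hyp]
          rcases List.mem_append.mp hy with hy | hy
          · have := hbound y hy; omega
          · exact absurd (List.mem_singleton.mp hy) hyp
      · intro y hy hcy
        rw [hcnt, hcnt, if_neg hrp] at hcy
        by_cases hyp : y = p
        · exfalso; subst hyp; simp at hcy; omega
        · rw [if_neg hyp] at hcy
          rcases List.mem_append.mp hy with hy | hy
          · exact hach y hy (by omega)
          · exact absurd (List.mem_singleton.mp hy) hyp
      · intro y hy
        rcases List.mem_append.mp hy with hy | hy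
        · exact hpub y hy
        · exact le_of_eq (List.mem_singleton.mp hy)
      · rw [hcnt]; simp; omega
  · have hxt : x ∉ t := by
      intro hxt
      exact (hx (le_antisymm (hub p hpmem) (hpub x hxt))).elim
    have hxc : t.count x = 0 := List.count_eq_zero_of_not_mem hxt
    have hb1 : 1 ≤ best := by
      have := List.count_pos_iff.mpr hres
      omega
    have hbeq : ((some p : Option String) == some x) = false := by simp [hx]
    simp only [altStep, hbeq]
    simp only [Bool.false_eq_true, if_false]
    by_cases hb : best ≤ 1
    · rw [if_pos hb]
      simp only [BInv]
      refine ⟨List.mem_append_right _ (List.mem_singleton.mpr rfl), ?_, ?_, ?_, x, rfl, List.mem_append_right _ (List.mem_singleton.mpr rfl), ?_, ?_⟩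
      · rw [hcnt]; simp [hxc]
      · intro y hy
        rcases List.mem_append.mp hy with hy | hy
        · have hyx : y ≠ x := fun hh => hxt (hh ▸ hy)
          rw [hcnt, if_neg hyx]; have := hbound y hy; omega
        · rw [List.mem_singleton.mp hy, hcnt]; simp [hxc]
      · intro y hy _
        rcases List.mem_append.mp hy with hy | hy
        · exact le_trans (hpub y hy) (hub p hpmem)
        · exact le_of_eq (List.mem_singleton.mp hy)
      · intro y hy
        rcases List.mem_append.mp hy with hy | hy
        · exact le_trans (hpub y hy) (hub p hpmem)
        · exact le_of_eq (List.mem_singleton.mp hy)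
      · rw [hcnt]; simp [hxc]
    · rw [if_neg hb]
      simp only [BInv]
      have hrx : res ≠ x := fun hh => hxt (hh ▸ hres)
      refine ⟨List.mem_append_left _ hres, ?_, ?_, ?_, x, rfl, List.mem_append_right _ (List.mem_singleton.mpr rfl), ?_, ?_⟩
      · rw [hcnt, if_neg hrx]; simpa using hbest
      · intro y hy
        rcases List.mem_append.mp hy with hy | hy
        · have hyx : y ≠ x := fun hh => hxt (hh ▸ hy)
          rw [hcnt, if_neg hyx]; have := hbound y hy; omega
        · rw [List.mem_singleton.mp hy, hcnt]; simp [hxc]; omega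
      · intro y hy hcy
        rw [hcnt, hcnt, if_neg hrx] at hcy
        by_cases hyx : y = x
        · exfalso; subst hyx; simp [hxc] at hcy; omega
        · rw [if_neg hyx] at hcy
          rcases List.mem_append.mp hy with hy | hy
          · exact hach y hy (by omega)
          · exact absurd (List.mem_singleton.mp hy) hyx
      · intro y hy
        rcases List.mem_append.mp hy with hy | hy
        · exact le_trans (hpub y hy) (hub p hpmem)
        · exact le_of_eq (List.mem_singleton.mp hy)
      · rw [hcnt]; simp [hxc]

theorem inv_fold (r : List String) : ∀ (t : List String) st,
    (t ++ r).Pairwise (· ≤ ·) → BInv t st → BInv (t ++ r) (r.foldl altStep st) := by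
  induction r with
  | nil => intro t st _ hinv; simpa using hinv
  | cons x r ih =>
    intro t st hpw hinv
    have hub : ∀ y ∈ t, y ≤ x := fun y hy =>
      (List.pairwise_append.mp hpw).2.2 y hy x (List.mem_cons_self ..)
    have h2 : ((t ++ [x]) ++ r).Pairwise (· ≤ ·) := by
      simpa [List.append_assoc] using hpw
    have := ih (t ++ [x]) (altStep st x) h2 (inv_step t x st hub hinv)
    rw [List.foldl_cons]
    simpa [List.append_assoc] using this

theorem B_good (products : List String) (h : products ≠ []) :
    GoodRes products (checkFeatured_alt products) := by
  simp only [checkFeatured_alt]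
  have hperm := PySem.List.sorted_perm products (fun x => x) false
  cases hs : PySem.List.sorted products (fun x => x) false with
  | nil =>
    exact absurd ((PySem.List.sorted_eq_nil_iff products (fun x => x) false).mp hs) h
  | cons x0 s' =>
    rw [hs] at hperm
    have hget : PySem.List.pyGet? (x0 :: s') 0 = some x0 := by
      simp [PySem.List.pyGet?, PySem.List.pyIdx?]
    rw [hget]
    show GoodRes products ((List.foldl altStep (x0, 0, 0, none) (x0 :: s')).1)
    have hstep : altStep (x0, 0, 0, none) x0 = (x0, 1, 1, some x0) := by
      simp [altStep]
    have hinv1 : BInv [x0] (x0, 1, 1, some x0) := by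
      refine ⟨List.mem_singleton.mpr rfl, by simp, ?_, ?_, x0, rfl, List.mem_singleton.mpr rfl, ?_, by simp⟩
      · intro y hy; rw [List.mem_singleton.mp hy]; simp
      · intro y hy _; exact le_of_eq (List.mem_singleton.mp hy)
      · intro y hy; exact le_of_eq (List.mem_singleton.mp hy)
    have hpw : ([x0] ++ s').Pairwise (· ≤ ·) := by
      have := PySem.List.sorted_pairwise products (fun x => x)
      rw [hs] at this
      simpa using this
    have hfin := inv_fold s' [x0] (x0, 1, 1, some x0) hpw hinv1
    rw [List.foldl_cons, hstep]
    simp only [List.singleton_append] at hfin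
    obtain ⟨hres, hbest, hbound, hach, -⟩ := hfin
    refine ⟨hperm.mem_iff.mp hres, ?_⟩
    intro y hy
    have hys : y ∈ x0 :: s' := hperm.mem_iff.mpr hy
    have hcnt : ∀ z : String, products.count z = (x0 :: s').count z :=
      fun z => (hperm.count_eq z).symm
    rw [hcnt y, hcnt _]
    have hb := hbound y hys
    by_cases he : (x0 :: s').count y = (x0 :: s').count (List.foldl altStep (x0, 1, 1, some x0) s').1
    · exact Or.inr ⟨he, hach y hys he⟩
    · left; omega

-- ===== VERDICT (by name: the statement is the Claim_ definition above) =====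
theorem checkFeatured_spec : Claim_equal_checkFeatured := by
  intro products _ hpre
  unfold Spec_checkFeatured
  exact good_unique (A_good products hpre) (B_good products hpre)
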